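-- pv_equiv track=rewrite | github.com/kevinxu993/Formula-Game | formula_game_functions.py | build_help
-- ===== SOURCE A (Python) =====
-- def build_help(formula):
--     '''(str) -> int
--     Takes a string formula and if there exists a root operator * or +, returns
--     the index of it, else returns -1.
--     REQ: formula is a string representing a boolean formula.
--     >>> build_help("x")
--     -1
--     >>> build_help("(x+y)")
--     2
--     >>> build_help("(x*y)")
--     2
--     '''
--     # create a counter of incomplete parentheses pairs
--     parentheses = 0
--     # create a default result: -1
--     result = -1
--     # check the entire string
--     for i in range(len(formula)):
--         # if the current character is (
--         if(formula[i] == "("):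
--             # add 1 to the counter of incomplete parentheses pairs
--             parentheses += 1
--         # if the current character is )
--         elif(formula[i] == ")"):
--             # deduct 1 from the counter of incomplete parentheses pairs
--             parentheses -= 1
--         # if the current character is * or +
--         # and we have 1 incomplete parentheses pair
--         elif(parentheses == 1 and (formula[i] == '*' or formula[i] == '+')):
--             # set the result to be current index
--             result = i
--     # return the result index
--     return result
-- ===== SOURCE B (Python) =====
-- def build_help(formula):
--     # Two-pass: build a prefix-depth table, then select the last depth-1 operator.
--     depth = [0]
--     for ch in formula:
--         depth.append(depth[-1] + (ch == '(') - (ch == ')'))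
--     result = -1
--     for i, (d, ch) in enumerate(zip(depth, formula)):
--         if d == 1 and ch in '*+':
--             result = i
--     return result
-- ===== Notes on version B (the rewrite author's own statement) =====
-- stated objective: alternative
-- what changed: Replaces A's single fused loop (mutable paren counter checked inline) with two passes: first a prefix-depth table (running balance), then a separate selection scan keeping the last operator index whose prefix depth is 1.
import Mathlib
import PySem

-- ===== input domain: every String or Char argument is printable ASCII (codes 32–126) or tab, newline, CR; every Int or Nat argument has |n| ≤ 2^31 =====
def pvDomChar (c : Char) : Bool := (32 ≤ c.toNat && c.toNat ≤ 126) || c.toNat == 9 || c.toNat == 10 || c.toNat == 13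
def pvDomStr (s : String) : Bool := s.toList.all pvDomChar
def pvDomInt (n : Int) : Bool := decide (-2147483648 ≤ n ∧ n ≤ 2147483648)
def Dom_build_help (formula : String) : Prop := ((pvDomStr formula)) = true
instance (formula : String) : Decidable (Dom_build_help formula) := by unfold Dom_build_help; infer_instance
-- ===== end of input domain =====

-- B replaces A's fused loop by a prefix-depth table plus a separate selection pass (alternative decomposition, same cost).

-- ===== PORT A =====
-- A's single loop over indices with a mutable parentheses counter and result.
def buildHelpGoA : Nat → Int → Int → List Char → Int
  | _, _, result, [] => result
  | i, paren, result, c :: cs =>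
    if c = '(' then buildHelpGoA (i + 1) (paren + 1) result cs
    else if c = ')' then buildHelpGoA (i + 1) (paren - 1) result cs
    else if paren = 1 ∧ (c = '*' ∨ c = '+') then buildHelpGoA (i + 1) paren (i : Int) cs
    else buildHelpGoA (i + 1) paren result cs

def build_help (formula : String) : Int :=
  buildHelpGoA 0 0 (-1) formula.toList

-- ===== PORT B =====
-- First pass: depth[i] = parenthesis balance of formula[:i] (running sum, one extra trailing entry).
def buildHelpDepths : Int → List Char → List Int
  | d, [] => [d]
  | d, c :: cs => d :: buildHelpDepths (d + ((if c = '(' then (1 : Int) else 0) - (if c = ')' then 1 else 0))) cs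

-- Second pass: enumerate(zip(depth, formula)), keep the last index with depth 1 and an operator char.
def buildHelpSel : Nat → Int → List Int → List Char → Int
  | _, r, _, [] => r
  | _, r, [], _ :: _ => r
  | i, r, d :: ds, c :: cs =>
    buildHelpSel (i + 1) (if d = 1 ∧ (c = '*' ∨ c = '+') then (i : Int) else r) ds cs

def build_help_alt (formula : String) : Int :=
  buildHelpSel 0 (-1) (buildHelpDepths 0 formula.toList) formula.toList

-- ===== PRECONDITION & SPEC =====
def Spec_build_help (formula : String) (out : Int) : Prop := out = build_help_alt formula
instance (formula : String) (out : Int) : Decidable (Spec_build_help formula out) := by unfold Spec_build_help; infer_instance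

-- ===== CLAIM (what is proved, stated in full; the proofs are below) =====
def Claim_equal_build_help : Prop := ∀ (formula : String), Dom_build_help formula → Spec_build_help formula (build_help formula)

-- ===== LEMMAS AND PROOFS =====
theorem buildHelpGoA_eq_sel (cs : List Char) : ∀ (i : Nat) (paren r : Int),
    buildHelpGoA i paren r cs = buildHelpSel i r (buildHelpDepths paren cs) cs := by
  induction cs with
  | nil => intro i paren r; simp [buildHelpGoA, buildHelpDepths, buildHelpSel]
  | cons c cs ih =>
    intro i paren r
    by_cases h1 : c = '('
    · simp [buildHelpGoA, buildHelpDepths, buildHelpSel, h1, ih]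
    · by_cases h2 : c = ')'
      · simp [buildHelpGoA, buildHelpDepths, buildHelpSel, h2, ih, sub_eq_add_neg]
      · by_cases h3 : paren = 1 ∧ (c = '*' ∨ c = '+')
        · simp [buildHelpGoA, buildHelpDepths, buildHelpSel, h1, h2, h3, ih]
        · simp [buildHelpGoA, buildHelpDepths, buildHelpSel, h1, h2, h3, ih]

-- ===== VERDICT (by name: the statement is the Claim_ definition above) =====
theorem build_help_spec : Claim_equal_build_help := by
  intro formula _
  unfold Spec_build_help build_help build_help_alt
  exact buildHelpGoA_eq_sel formula.toList 0 0 (-1)
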